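-- pv_equiv track=rewrite | github.com/cristi-cosulianu/Retele-Neuronale | RN/Lab1/HomeworkNumpy.py | extractFactor
-- ===== SOURCE A (Python) =====
-- def extractFactor(line):
--     factor = 0
--     sign = 1
--     foundFactor = False
--
--     for i in range(len(line)):
--         char = line[i]
--         if char == '-':
--             sign = -1
--         elif char in "0123456789":
--             foundFactor = True
--             factor = factor * 10 + int(char)
--         elif char.isalpha():
--             if (factor == 0) & (foundFactor == False):
--                 factor = 1
--             return (line[i+1:], factor * sign, char)
--
--     return (line, factor * sign, 'Equal')
-- ===== SOURCE B (Python) =====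
-- def extractFactor(line):
--     # Two-phase: locate the first alphabetic character, then extract
--     # sign and digit string from the prefix by comprehension.
--     for i, ch in enumerate(line):
--         if ch.isalpha():
--             prefix = line[:i]
--             digits = [c for c in prefix if c in "0123456789"]
--             sign = -1 if '-' in prefix else 1
--             factor = int(''.join(digits)) if digits else 1
--             return (line[i+1:], factor * sign, ch)
--     digits = [c for c in line if c in "0123456789"]
--     sign = -1 if '-' in line else 1
--     factor = int(''.join(digits)) if digits else 0
--     return (line, factor * sign, 'Equal')
-- ===== Notes on version B (the rewrite author's own statement) =====
-- stated objective: alternative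
-- what changed: Replaces A's single running-state scan (factor/sign/found accumulators updated per character) by a locate-then-extract decomposition: find the first alphabetic character, then compute the sign by a membership test and the factor by int() of the collected digit characters of the prefix.
import Mathlib
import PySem

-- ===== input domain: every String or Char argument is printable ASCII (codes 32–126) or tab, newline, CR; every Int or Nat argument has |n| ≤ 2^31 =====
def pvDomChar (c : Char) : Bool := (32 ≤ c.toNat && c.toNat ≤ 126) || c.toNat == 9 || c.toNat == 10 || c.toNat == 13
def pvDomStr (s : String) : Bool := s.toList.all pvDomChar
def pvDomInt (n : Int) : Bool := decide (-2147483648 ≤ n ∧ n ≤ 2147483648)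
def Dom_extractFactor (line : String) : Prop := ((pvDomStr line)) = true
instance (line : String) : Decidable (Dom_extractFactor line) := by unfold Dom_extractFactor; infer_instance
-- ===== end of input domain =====

-- B replaces A's running-state character scan by a locate-then-extract decomposition (same cost); return-value equivalence, no mutation involved.


-- ===== PORT A =====
-- A's loop over line's characters, carrying factor/sign/foundFactor; `line` is kept whole for the final return.
def extractFactorGo (line : String) : List Char → Int → Int → Bool → String × Int × String
  | [], factor, sign, _ => (line, factor * sign, "Equal")
  | c :: rest, factor, sign, found =>
    if c = '-' then
      extractFactorGo line rest factor (-1) found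
    else if PySem.Chars.isdigit c then
      extractFactorGo line rest (factor * 10 + ((c.toNat : Int) - 48)) sign true
    else if PySem.Chars.isalpha c then
      (String.mk rest, (if factor = 0 ∧ found = false then 1 else factor) * sign, String.mk [c])
    else
      extractFactorGo line rest factor sign found

def extractFactor (line : String) : String × Int × String :=
  extractFactorGo line line.toList 0 1 false

-- ===== PORT B =====
-- Locate phase: split at the first alphabetic character, returning (prefix, that char, rest).
def splitAlpha : List Char → Option (List Char × Char × List Char)
  | [] => none
  | c :: rest =>
    if PySem.Chars.isalpha c then some ([], c, rest)
    else match splitAlpha rest with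
      | some (p, a, r) => some (c :: p, a, r)
      | none => none

-- int(''.join(digits)) on a nonempty all-digit list: exact for digit characters.
def stepD (acc : Int) (c : Char) : Int := acc * 10 + ((c.toNat : Int) - 48)
def digitsVal (ds : List Char) : Int := ds.foldl stepD 0

def extractFactor_alt (line : String) : String × Int × String :=
  match splitAlpha line.toList with
  | some (p, a, r) =>
      let ds := p.filter PySem.Chars.isdigit
      (String.mk r, (if ds = [] then 1 else digitsVal ds) * (if p.contains '-' then -1 else 1), String.mk [a])
  | none =>
      let ds := line.toList.filter PySem.Chars.isdigit
      (line, (if ds = [] then 0 else digitsVal ds) * (if line.toList.contains '-' then -1 else 1), "Equal")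

-- ===== PRECONDITION & SPEC =====
def Spec_extractFactor (line : String) (out : String × Int × String) : Prop := out = extractFactor_alt line
instance (line : String) (out : String × Int × String) : Decidable (Spec_extractFactor line out) := by unfold Spec_extractFactor; infer_instance

-- ===== CLAIM (what is proved, stated in full; the proofs are below) =====
def Claim_equal_extractFactor : Prop := ∀ (line : String), Dom_extractFactor line → Spec_extractFactor line (extractFactor line)

-- ===== LEMMAS AND PROOFS =====


-- A's loop, expressed through B's locate-then-extract decomposition, for any carried state.
theorem extractFactorGo_eq (line : String) (cs : List Char) (f s : Int) (found : Bool) :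
    extractFactorGo line cs f s found =
      match splitAlpha cs with
      | some (p, a, r) =>
          let f' := (p.filter PySem.Chars.isdigit).foldl stepD f
          let found' := found || p.any PySem.Chars.isdigit
          (String.mk r, (if f' = 0 ∧ found' = false then 1 else f') * (if p.contains '-' then -1 else s), String.mk [a])
      | none =>
          (line, (cs.filter PySem.Chars.isdigit).foldl stepD f * (if cs.contains '-' then -1 else s), "Equal") := by
  induction cs generalizing f s found with
  | nil => simp [extractFactorGo, splitAlpha]
  | cons c rest ih =>
    by_cases hm : c = '-'
    · subst hm
      have hd : PySem.Chars.isdigit '-' = false := by decide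
      have ha : PySem.Chars.isalpha '-' = false := by decide
      rw [extractFactorGo, if_pos rfl, ih]
      cases hsp : splitAlpha rest with
      | none => simp [splitAlpha, hsp, ha, hd, stepD]
      | some x =>
        obtain ⟨p, a, r⟩ := x
        simp [splitAlpha, hsp, ha, hd, stepD]
    · by_cases hdg : PySem.Chars.isdigit c = true
      · have ha : PySem.Chars.isalpha c = false := by
          simp [PySem.Chars.isdigit, PySem.Chars.isalpha, PySem.Chars.isupper, PySem.Chars.islower,
            Char.le_def, Char.lt_def, UInt32.le_iff_toNat_le, UInt32.lt_iff_toNat_lt] at hdg ⊢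
          omega
        rw [extractFactorGo, if_neg hm, if_pos hdg, ih]
        have hf0 : f * 10 + ((c.toNat : Int) - 48) = stepD f c := rfl
        cases hsp : splitAlpha rest with
        | none => simp [splitAlpha, hsp, ha, hdg, hm, stepD, Ne.symm hm]
        | some x =>
          obtain ⟨p, a, r⟩ := x
          simp [splitAlpha, hsp, ha, hdg, hm, stepD, Ne.symm hm]
      · by_cases hal : PySem.Chars.isalpha c = true
        · rw [extractFactorGo, if_neg hm, if_neg (by simp [hdg]), if_pos hal]
          simp [splitAlpha, hal]
        · rw [extractFactorGo, if_neg hm, if_neg (by simp [hdg]), if_neg (by simp [hal]), ih]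
          cases hsp : splitAlpha rest with
          | none => simp [splitAlpha, hsp, hal, hdg, hm, Ne.symm hm]
          | some x =>
            obtain ⟨p, a, r⟩ := x
            simp [splitAlpha, hsp, hal, hdg, hm, Ne.symm hm]

theorem filter_nil_iff_any_false (p : Char → Bool) (l : List Char) :
    l.filter p = [] ↔ l.any p = false := by
  simp [List.filter_eq_nil_iff, List.any_eq_false]

-- ===== VERDICT (by name: the statement is the Claim_ definition above) =====
theorem extractFactor_spec : Claim_equal_extractFactor := by
  intro line _
  unfold Spec_extractFactor extractFactor extractFactor_alt
  rw [extractFactorGo_eq]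
  cases hsp : splitAlpha line.toList with
  | none =>
    by_cases hds : line.toList.filter PySem.Chars.isdigit = []
    · simp [hds, digitsVal]
    · simp [hds, digitsVal, stepD]
  | some x =>
    obtain ⟨p, a, r⟩ := x
    by_cases hds : p.filter PySem.Chars.isdigit = []
    · have hany : p.any PySem.Chars.isdigit = false := (filter_nil_iff_any_false _ _).1 hds
      simp [hds, hany, digitsVal]
    · have hany : p.any PySem.Chars.isdigit = true := by
        cases h : p.any PySem.Chars.isdigit
        · exact absurd ((filter_nil_iff_any_false _ _).2 h) hds
        · rfl
      simp [hds, hany, digitsVal, stepD]
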